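-- pv_equiv track=rewrite | github.com/Hee-Jae/Algorithm | toss_codingtest/1.py | solution
-- ===== SOURCE A (Python) =====
-- def solution(name_list):
--     answer = []
--     profile = {}
--     for name in name_list:
--       if name in profile:
--         profile[name] = chr(ord(profile[name])+1)
--       else:
--         profile[name] = 'A'
--       answer.append(name + profile[name])
--     return answer
-- ===== SOURCE B (Python) =====
-- def solution(name_list):
--     # Two staged passes: group the occurrence indices per name, then scatter
--     # each group's letters (A, B, ...) into a pre-sized output by position.
--     positions = {}
--     for i, name in enumerate(name_list):
--         positions.setdefault(name, []).append(i)
--     out = [""] * len(name_list)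
--     for name, idxs in positions.items():
--         for k, i in enumerate(idxs):
--             out[i] = name + chr(ord('A') + k)
--     return out
-- ===== Notes on version B (the rewrite author's own statement) =====
-- stated objective: alternative
-- what changed: Replaces A's single pass with a running per-name letter dict by a two-stage group-and-scatter: first group occurrence indices per name, then write each group's letter sequence A,B,... into a pre-sized output array by position (output built out of order).
import Mathlib
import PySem

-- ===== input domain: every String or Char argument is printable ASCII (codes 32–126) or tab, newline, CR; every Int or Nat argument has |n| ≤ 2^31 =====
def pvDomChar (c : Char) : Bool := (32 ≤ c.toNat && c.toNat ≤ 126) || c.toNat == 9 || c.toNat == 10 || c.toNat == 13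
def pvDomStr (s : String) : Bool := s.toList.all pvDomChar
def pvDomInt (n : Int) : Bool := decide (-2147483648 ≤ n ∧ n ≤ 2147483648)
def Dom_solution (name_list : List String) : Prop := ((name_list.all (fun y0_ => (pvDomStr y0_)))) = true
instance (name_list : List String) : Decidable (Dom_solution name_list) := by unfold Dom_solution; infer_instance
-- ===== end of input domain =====

-- B replaces A's single pass with a running per-name letter dict by a two-stage
-- group-and-scatter pass structure (objective: alternative, same cost).

-- ===== PORT A =====
-- A's dict value (the current one-letter suffix) is kept as its code point (ord);
-- chr is applied (Char.ofNat) when the suffix is appended — exact for the letters this loop produces.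
-- 'if name in profile: … profile[name] …' is ported as one match on get? (membership + lookup).
def solutionGo : List String → PySem.Dict String Nat → List String → List String
  | [], _, ans => ans
  | n :: rest, prof, ans =>
    match prof.get? n with
    | some c => solutionGo rest (prof.insert n (c + 1)) (ans ++ [n ++ String.mk [Char.ofNat (c + 1)]])
    | none   => solutionGo rest (prof.insert n 65) (ans ++ [n ++ String.mk [Char.ofNat 65]])

def solution (name_list : List String) : List String :=
  solutionGo name_list PySem.Dict.empty []

-- ===== PORT B =====
-- first pass: positions.setdefault(name, []).append(i)  ==  d[name] = d.get(name, []) + [i],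
-- ported as Dict.modify over enumerate(name_list)
def altPositions (name_list : List String) : PySem.Dict String (List Int) :=
  (PySem.List.enumerate name_list 0).foldl (fun d p => d.modify p.2 [] (· ++ [p.1])) PySem.Dict.empty

-- inner loop 'for k, i in enumerate(idxs): out[i] = name + chr(ord('A') + k)':
-- the enumerate counter k is a nonnegative int, carried as Nat; out[i] = v is pySetD (i is in range by construction)
def altScatterGo (n : String) : List Int → Nat → List String → List String
  | [], _, out => out
  | i :: rest, k, out => altScatterGo n rest (k + 1) (PySem.List.pySetD out i (n ++ String.mk [Char.ofNat (65 + k)]))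

-- outer loop over positions.items()
def altScatterAll : List (String × List Int) → List String → List String
  | [], out => out
  | (n, idxs) :: rest, out => altScatterAll rest (altScatterGo n idxs 0 out)

def solution_alt (name_list : List String) : List String :=
  altScatterAll (altPositions name_list).items (List.replicate name_list.length "")

-- ===== PRECONDITION & SPEC =====
def Spec_solution (name_list : List String) (out : List String) : Prop := out = solution_alt name_list
instance (name_list : List String) (out : List String) : Decidable (Spec_solution name_list out) := by unfold Spec_solution; infer_instance

-- ===== CLAIM (what is proved, stated in full; the proofs are below) =====
def Claim_equal_solution : Prop := ∀ (name_list : List String), Dom_solution name_list → Spec_solution name_list (solution name_list)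

-- ===== LEMMAS AND PROOFS =====

-- the common value both programs compute at index j
def tgt (L : List String) (j : Nat) : String :=
  L[j]?.getD "" ++ String.mk [Char.ofNat (65 + (L.take j).count (L[j]?.getD ""))]

def target (L : List String) : List String := (List.range' 0 L.length).map (tgt L)

-- indices (enumerate-style, starting at s) of the occurrences of n in L
def posOfFrom (L : List String) (s : Int) (n : String) : List Int :=
  ((PySem.List.enumerate L s).filter (fun p => p.2 == n)).map (·.1)

lemma posOfFrom_nil (s : Int) (n : String) : posOfFrom [] s n = [] := by
  simp [posOfFrom, PySem.List.enumerate_nil]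

lemma posOfFrom_cons (x : String) (rest : List String) (s : Int) (n : String) :
    posOfFrom (x :: rest) s n = (if x = n then [s] else []) ++ posOfFrom rest (s + 1) n := by
  simp [posOfFrom, PySem.List.enumerate_cons, List.filter_cons]
  by_cases h : x = n <;> simp [h]

-- A-side: the running-dict loop produces target
lemma solutionGo_eq (L : List String) :
    ∀ (rest seen : List String) (prof : PySem.Dict String Nat) (ans : List String),
      seen ++ rest = L →
      (∀ s : String, prof.get? s =
        if seen.count s = 0 then none else some (64 + seen.count s)) →
      solutionGo rest prof ans = ans ++ (List.range' seen.length rest.length).map (tgt L) := by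
  intro rest
  induction rest with
  | nil => intro seen prof ans _ _; simp [solutionGo]
  | cons n rest ih =>
    intro seen prof ans hL hinv
    have hget : L[seen.length]? = some n := by
      rw [← hL]; simp
    have htake : L.take seen.length = seen := by
      rw [← hL]; exact List.take_left
    have htgt : tgt L seen.length = n ++ String.mk [Char.ofNat (65 + seen.count n)] := by
      simp [tgt, hget, htake]
    have hrange : (List.range' seen.length (n :: rest).length).map (tgt L) =
        tgt L seen.length :: (List.range' (seen.length + 1) rest.length).map (tgt L) := by
      simp [List.range'_succ]
    have hstep : ∀ prof' : PySem.Dict String Nat,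
        (∀ s : String, prof'.get? s =
          if (seen ++ [n]).count s = 0 then none else some (64 + (seen ++ [n]).count s)) →
        solutionGo rest prof' (ans ++ [n ++ String.mk [Char.ofNat (65 + seen.count n)]]) =
          ans ++ (List.range' seen.length (n :: rest).length).map (tgt L) := by
      intro prof' hinv'
      rw [ih (seen ++ [n]) prof' _ (by simpa using hL) hinv']
      rw [hrange, htgt]
      simp [List.append_assoc]
    match hg : prof.get? n with
    | none =>
      have h0 : seen.count n = 0 := by
        have := hinv n; rw [hg] at this; split at this
        · assumption
        · exact absurd this (by simp)
      simp only [solutionGo, hg]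
      have := hstep (prof.insert n 65) ?_
      · simpa [h0] using this
      · intro s
        by_cases hs : s = n
        · subst hs
          rw [PySem.Dict.get?_insert_self]
          simp [List.count_append, h0]
        · rw [PySem.Dict.get?_insert_of_ne _ _ hs, hinv s]
          have hns : n ≠ s := fun h => hs h.symm
          simp [List.count_append, hns]
    | some c =>
      have hc : c = 64 + seen.count n := by
        have := hinv n; rw [hg] at this; split at this
        · exact absurd this (by simp)
        · exact Option.some_inj.mp this
      have hpos : seen.count n ≠ 0 := by
        intro h; have := hinv n; rw [hg, h] at this; simp at this
      simp only [solutionGo, hg]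
      have := hstep (prof.insert n (c + 1)) ?_
      · have hc1 : c + 1 = 65 + seen.count n := by omega
        simpa [hc1] using this
      · intro s
        by_cases hs : s = n
        · subst hs
          rw [PySem.Dict.get?_insert_self]
          simp [List.count_append, hc]
          omega
        · rw [PySem.Dict.get?_insert_of_ne _ _ hs, hinv s]
          have hns : n ≠ s := fun h => hs h.symm
          simp [List.count_append, hns]

lemma solution_eq_target (L : List String) : solution L = target L := by
  unfold solution target
  have := solutionGo_eq L L [] PySem.Dict.empty [] (by simp) (by
    intro s; simp [PySem.Dict.get?, PySem.Dict.empty])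
  simpa using this

-- rank lemma: the m-th recorded index of n corresponds to the occurrence with prefix count m
lemma posOfFrom_rank (n : String) :
    ∀ (L : List String) (s : Int) (m : Nat) (i : Int),
      (posOfFrom L s n)[m]? = some i →
      ∃ j : Nat, i = s + j ∧ j < L.length ∧ L[j]? = some n ∧ (L.take j).count n = m := by
  intro L
  induction L with
  | nil => intro s m i h; simp [posOfFrom_nil] at h
  | cons x rest ih =>
    intro s m i h
    rw [posOfFrom_cons] at h
    by_cases hx : x = n
    · subst hx
      simp only [if_pos rfl] at h
      match m with
      | 0 =>
        simp at h
        exact ⟨0, by simpa using h.symm, by simp, by simp, by simp⟩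
      | m + 1 =>
        simp [List.getElem?_append] at h
        obtain ⟨j, hj1, hj2, hj3, hj4⟩ := ih (s + 1) m i h
        exact ⟨j + 1, by omega, by simpa using hj2, by simpa using hj3,
          by simp [List.count_cons, hj4]⟩
    · simp only [if_neg hx, List.nil_append] at h
      obtain ⟨j, hj1, hj2, hj3, hj4⟩ := ih (s + 1) m i h
      refine ⟨j + 1, by omega, by simpa using hj2, by simpa using hj3, ?_⟩
      have hxn : ¬ (x = n) := hx
      simp [List.count_cons, hj4, hxn]

-- membership: each occurrence index is recorded under its own name
lemma posOfFrom_mem :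
    ∀ (L : List String) (s : Int) (j : Nat) (n : String), L[j]? = some n →
      s + (j : Int) ∈ posOfFrom L s n := by
  intro L
  induction L with
  | nil => intro s j n h; simp at h
  | cons x rest ih =>
    intro s j n h
    match j with
    | 0 =>
      simp at h
      simp [posOfFrom_cons, h]
    | j + 1 =>
      have := ih (s + 1) j n (by simpa using h)
      rw [posOfFrom_cons]
      refine List.mem_append_right _ ?_
      simpa [add_assoc, add_comm, add_left_comm] using this

-- the positions dict: value at n is posOfFrom L 0 n
lemma altPositions_getD (L : List String) (n : String) :
    (altPositions L).getD n [] = posOfFrom L 0 n := by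
  unfold altPositions posOfFrom
  have hswap : (PySem.List.enumerate L 0).foldl (fun d p => d.modify p.2 [] (· ++ [p.1])) PySem.Dict.empty
      = ((PySem.List.enumerate L 0).map Prod.swap).foldl (fun d p => d.modify p.1 [] (· ++ [p.2])) PySem.Dict.empty := by
    rw [List.foldl_map]; rfl
  rw [hswap, PySem.Dict.getD_foldl_modify_append]
  simp [PySem.Dict.getD_empty, List.filter_map, List.map_map, Function.comp_def]

lemma altPositions_keys_nodup (L : List String) : (altPositions L).keys.Nodup := by
  unfold altPositions
  exact PySem.Dict.nodup_keys_foldl_modify_key _ Prod.snd [] (fun _ p => (· ++ [p.1])) _ PySem.Dict.nodup_keys_empty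

lemma altPositions_mem_keys (L : List String) (n : String) :
    n ∈ (altPositions L).keys ↔ n ∈ L := by
  unfold altPositions
  rw [PySem.Dict.keys_foldl_modify_key]
  simp [PySem.Set.mem_update, PySem.Dict.keys_empty, PySem.List.map_snd_enumerate]

lemma altPositions_items (L : List String) :
    ∀ p ∈ (altPositions L).items, p.2 = posOfFrom L 0 p.1 := by
  intro p hp
  have := PySem.Dict.getD_of_mem_items (d := altPositions L) (k := p.1) (v := p.2)
    (by simpa using hp) (altPositions_keys_nodup L) (d0 := [])
  rw [← this, altPositions_getD]

-- scatter of one group: fills exactly the group's indices with tgt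
lemma altScatterGo_get (L : List String) (n : String) :
    ∀ (idxs : List Int) (k : Nat) (out : List String), out.length = L.length →
      (∀ (m : Nat) (i : Int), idxs[m]? = some i →
        ∃ j : Nat, i = (j : Int) ∧ j < L.length ∧ L[j]? = some n ∧ (L.take j).count n = k + m) →
      (altScatterGo n idxs k out).length = L.length ∧
      ∀ j : Nat, (altScatterGo n idxs k out)[j]? = if (j : Int) ∈ idxs then some (tgt L j) else out[j]? := by
  intro idxs
  induction idxs with
  | nil => intro k out hlen _; simp [altScatterGo, hlen]
  | cons i rest ih =>
    intro k out hlen hidx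
    obtain ⟨j0, hij, hj0len, hj0n, hj0c⟩ := hidx 0 i (by simp)
    have hval : n ++ String.mk [Char.ofNat (65 + k)] = tgt L j0 := by
      simp [tgt, hj0n, hj0c]
    have hset : PySem.List.pySetD out i (n ++ String.mk [Char.ofNat (65 + k)]) =
        out.set j0 (tgt L j0) := by
      rw [hij, PySem.List.pySetD_natCast, hval]
    rw [altScatterGo, hset]
    have hlen' : (out.set j0 (tgt L j0)).length = L.length := by simp [hlen]
    have hrest : ∀ (m : Nat) (i' : Int), rest[m]? = some i' →
        ∃ j : Nat, i' = (j : Int) ∧ j < L.length ∧ L[j]? = some n ∧ (L.take j).count n = (k + 1) + m := by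
      intro m i' hm
      obtain ⟨j, h1, h2, h3, h4⟩ := hidx (m + 1) i' (by simpa using hm)
      exact ⟨j, h1, h2, h3, by omega⟩
    obtain ⟨hL1, hL2⟩ := ih (k + 1) (out.set j0 (tgt L j0)) hlen' hrest
    refine ⟨hL1, fun j => ?_⟩
    rw [hL2 j]
    by_cases hr : (j : Int) ∈ rest
    · simp [hr]
    · by_cases hji : (j : Int) = i
      · have hjj0 : j = j0 := by exact_mod_cast hji.trans hij
        subst hjj0
        simp [hr, hji, List.getElem?_set_self (by omega : j < out.length)]
      · have hjj0 : j ≠ j0 := fun h => hji (by rw [h, hij])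
        have hmem : ¬ ((j : Int) ∈ i :: rest) := by simp [hji, hr]
        simp [hr, hmem, List.getElem?_set_ne (show j0 ≠ j from fun h => hjj0 h.symm)]

-- scatter of all groups
lemma altScatterAll_get (L : List String) :
    ∀ (entries : List (String × List Int)) (out : List String), out.length = L.length →
      (∀ p ∈ entries, p.2 = posOfFrom L 0 p.1) →
      (altScatterAll entries out).length = L.length ∧
      ∀ j : Nat,
        ((∃ p ∈ entries, (j : Int) ∈ p.2) → (altScatterAll entries out)[j]? = some (tgt L j)) ∧
        ((∀ p ∈ entries, (j : Int) ∉ p.2) → (altScatterAll entries out)[j]? = out[j]?) := by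
  intro entries
  induction entries with
  | nil =>
    intro out hlen _
    exact ⟨by simpa [altScatterAll] using hlen, fun j => ⟨by simp, fun _ => by simp [altScatterAll]⟩⟩
  | cons hd rest ih =>
    obtain ⟨n, idxs⟩ := hd
    intro out hlen hp
    have hidxs : idxs = posOfFrom L 0 n := hp (n, idxs) (by simp)
    have hrank : ∀ (m : Nat) (i : Int), idxs[m]? = some i →
        ∃ j : Nat, i = (j : Int) ∧ j < L.length ∧ L[j]? = some n ∧ (L.take j).count n = 0 + m := by
      intro m i hm
      rw [hidxs] at hm
      obtain ⟨j, h1, h2, h3, h4⟩ := posOfFrom_rank n L 0 m i hm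
      exact ⟨j, by omega, h2, h3, by omega⟩
    obtain ⟨hgl, hgo⟩ := altScatterGo_get L n idxs 0 out hlen hrank
    obtain ⟨hal, hao⟩ := ih (altScatterGo n idxs 0 out) hgl (fun p hp' => hp p (by simp [hp']))
    refine ⟨by simpa [altScatterAll] using hal, fun j => ⟨?_, ?_⟩⟩
    · rintro ⟨p, hpmem, hpj⟩
      show (altScatterAll ((n, idxs) :: rest) out)[j]? = _
      simp only [altScatterAll]
      by_cases hr : ∃ q ∈ rest, (j : Int) ∈ q.2
      · exact (hao j).1 hr
      · push_neg at hr
        have hj : (j : Int) ∈ idxs := by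
          rcases List.mem_cons.mp hpmem with h | h
          · rw [h] at hpj; exact hpj
          · exact absurd hpj (hr p h)
        rw [(hao j).2 hr, hgo j, if_pos hj]
    · intro hnone
      simp only [altScatterAll]
      rw [(hao j).2 (fun p hp' => hnone p (by simp [hp'])), hgo j,
        if_neg (hnone (n, idxs) (by simp))]

lemma solution_alt_eq_target (L : List String) : solution_alt L = target L := by
  unfold solution_alt
  obtain ⟨hl, ho⟩ := altScatterAll_get L (altPositions L).items (List.replicate L.length "")
    (by simp) (altPositions_items L)
  apply List.ext_getElem?
  intro j
  by_cases hj : j < L.length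
  · obtain ⟨nm, hnm⟩ : ∃ nm, L[j]? = some nm := ⟨L[j], by simp [hj]⟩
    have hkey : nm ∈ (altPositions L).keys :=
      (altPositions_mem_keys L nm).mpr (List.mem_of_getElem? hnm)
    have hitem : (nm, (altPositions L).getD nm []) ∈ (altPositions L).items := by
      rw [PySem.Dict.items_eq_map_keys _ (altPositions_keys_nodup L) ([])]
      exact List.mem_map.mpr ⟨nm, hkey, rfl⟩
    have hjmem : (j : Int) ∈ (altPositions L).getD nm [] := by
      rw [altPositions_getD]
      simpa using posOfFrom_mem L 0 j nm hnm
    rw [(ho j).1 ⟨(nm, (altPositions L).getD nm []), hitem, hjmem⟩]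
    unfold target
    rw [List.getElem?_map, List.getElem?_eq_getElem (by simpa using hj)]
    simp
  · rw [List.getElem?_eq_none (by rw [hl]; omega),
      List.getElem?_eq_none (show (target L).length ≤ j by simp [target]; omega)]

-- ===== VERDICT (by name: the statement is the Claim_ definition above) =====
theorem solution_spec : Claim_equal_solution := by
  intro name_list _
  unfold Spec_solution
  rw [solution_eq_target, solution_alt_eq_target]
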